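-- pv_equiv track=rewrite | github.com/rishav3602/PY-Basic-Programming-Assignment-8 | PY_Basic_Programming_Assignment-24.py | amplify
-- ===== SOURCE A (Python) =====
-- def amplify(n):
--     result = []
--     for i in range(1, n+1):
--         if i % 4 == 0:
--             result.append(i * 10)
--         else:
--             result.append(i)
--     return result
-- ===== SOURCE B (Python) =====
-- def amplify(n):
--     result = list(range(1, n + 1))
--     for i in range(4, n + 1, 4):
--         result[i - 1] *= 10
--     return result
-- ===== Notes on version B (the rewrite author's own statement) =====
-- stated objective: alternative
-- what changed: B builds the plain list 1..n in one step and then strides only over the multiples of 4 with range(4, n+1, 4), multiplying those positions in place, instead of A's single pass that tests i % 4 on every element.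
import Mathlib
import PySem

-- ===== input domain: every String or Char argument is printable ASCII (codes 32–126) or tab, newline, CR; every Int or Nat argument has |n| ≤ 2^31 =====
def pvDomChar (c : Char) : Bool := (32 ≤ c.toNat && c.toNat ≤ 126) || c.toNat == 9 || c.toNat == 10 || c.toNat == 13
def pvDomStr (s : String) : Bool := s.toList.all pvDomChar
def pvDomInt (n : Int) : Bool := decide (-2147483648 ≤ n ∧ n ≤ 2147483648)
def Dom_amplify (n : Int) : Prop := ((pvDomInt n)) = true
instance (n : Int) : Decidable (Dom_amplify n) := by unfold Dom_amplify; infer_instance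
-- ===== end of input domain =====

-- B builds the plain list 1..n at once, then strides only over the multiples of 4
-- (range(4, n+1, 4)) multiplying those positions in place — no per-element modulo test.

-- ===== PORT A =====
-- result = []; for i in range(1, n+1): append i*10 if i % 4 == 0 else i
def amplify (n : Int) : List Int :=
  (PySem.List.pyRange 1 (n + 1) 1).foldl
    (fun result i =>
      if PySem.Int.mod i 4 = 0 then result ++ [i * 10] else result ++ [i])
    []

-- ===== PORT B =====
-- result = list(range(1, n+1)); for i in range(4, n+1, 4): result[i-1] *= 10
-- result[i-1] *= 10 read+write ported with pyGetD/pySetD; the index i-1 is always in range here.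
def amplify_alt (n : Int) : List Int :=
  let result := PySem.List.pyRange 1 (n + 1) 1
  (PySem.List.pyRange 4 (n + 1) 4).foldl
    (fun result i =>
      PySem.List.pySetD result (i - 1) (PySem.List.pyGetD result (i - 1) 0 * 10))
    result

-- ===== PRECONDITION & SPEC =====
def Spec_amplify (n : Int) (out : List Int) : Prop := out = amplify_alt n
instance (n : Int) (out : List Int) : Decidable (Spec_amplify n out) := by unfold Spec_amplify; infer_instance

-- ===== CLAIM (what is proved, stated in full; the proofs are below) =====
def Claim_equal_amplify : Prop := ∀ (n : Int), Dom_amplify n → Spec_amplify n (amplify n)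

-- ===== LEMMAS AND PROOFS =====

-- B's in-place update loop, pointwise: after the fold, position j holds r[j]*10 when j+1
-- is one of the (distinct, in-range) indices ms, and r[j] otherwise.
theorem pv_loop_getElem? (ms : List Int) (r : List Int) (hnd : ms.Nodup)
    (hin : ∀ i ∈ ms, 1 ≤ i ∧ i ≤ (r.length : Int)) (j : Nat) :
    (ms.foldl (fun result i =>
        PySem.List.pySetD result (i - 1) (PySem.List.pyGetD result (i - 1) 0 * 10)) r)[j]? =
      if ((j : Int) + 1) ∈ ms then r[j]?.map (· * 10) else r[j]? := by
  induction ms generalizing r with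
  | nil => simp
  | cons i ms ih =>
    obtain ⟨hnotmem, hnd'⟩ := List.nodup_cons.mp hnd
    obtain ⟨hi1, hilen⟩ := hin i (List.mem_cons_self)
    have h0 : (0 : Int) ≤ i - 1 := by omega
    have hk : (i - 1).toNat < r.length := by omega
    set r' := PySem.List.pySetD r (i - 1) (PySem.List.pyGetD r (i - 1) 0 * 10) with hr'
    have hlen' : r'.length = r.length := PySem.List.length_pySetD r _ _
    have hset : r' = r.set (i - 1).toNat (r.getD (i - 1).toNat 0 * 10) := by
      rw [hr', PySem.List.pySetD_of_nonneg r _ h0, PySem.List.pyGetD_of_nonneg r 0 h0]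
    rw [List.foldl_cons, ih r' hnd'
      (fun x hx => by have := hin x (List.mem_cons_of_mem i hx); omega)]
    have hgr' : ∀ (m : Nat), r'[m]? =
        if (i - 1).toNat = m then some (r.getD (i - 1).toNat 0 * 10) else r[m]? := by
      intro m
      rw [hset, List.getElem?_set]
      split_ifs with h1 _ <;> simp_all
    by_cases hji : ((j : Int) + 1) = i
    · have hjk : (i - 1).toNat = j := by omega
      have hjm : ¬ ((j : Int) + 1) ∈ ms := by rwa [hji]
      have hjcons : ((j : Int) + 1) ∈ i :: ms := by rw [hji]; exact List.mem_cons_self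
      have hsome : r[j]? = some r[j] := List.getElem?_eq_getElem (by omega)
      rw [if_neg hjm, if_pos hjcons, hgr' j, if_pos hjk, hjk, hsome]
      simp [List.getD, hsome]
    · have hne : (i - 1).toNat ≠ j := by omega
      have hr'j : r'[j]? = r[j]? := by rw [hgr' j, if_neg hne]
      simp [hr'j, List.mem_cons, hji]

-- ===== VERDICT (by name: the statement is the Claim_ definition above) =====
theorem amplify_spec : Claim_equal_amplify := by
  intro n _
  unfold Spec_amplify amplify amplify_alt
  have hA : (fun (result : List Int) (i : Int) =>
      if PySem.Int.mod i 4 = 0 then result ++ [i * 10] else result ++ [i]) =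
      fun result i => result ++ [if PySem.Int.mod i 4 = 0 then i * 10 else i] := by
    funext r i; split <;> rfl
  rw [hA, PySem.List.foldl_append_singleton_eq_map, List.nil_append]
  set R := PySem.List.pyRange 1 (n + 1) 1 with hR
  have hRlen : R.length = (n : Int).toNat := by
    rw [hR, PySem.List.length_pyRange_one]; congr 1; omega
  have hnd : (PySem.List.pyRange 4 (n + 1) 4).Nodup := by
    rw [PySem.List.pyRange_of_pos 4 (n + 1) (by norm_num)]
    exact (List.nodup_range).map (fun a b h => by omega)
  have hin : ∀ i ∈ PySem.List.pyRange 4 (n + 1) 4, 1 ≤ i ∧ i ≤ (R.length : Int) := by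
    intro i hi
    obtain ⟨h1, h2', _⟩ := (PySem.List.mem_pyRange_iff_of_pos (by norm_num) i).mp hi
    constructor
    · omega
    · rw [hRlen]; omega
  apply List.ext_getElem?
  intro j
  rw [pv_loop_getElem? _ R hnd hin j, List.getElem?_map]
  rw [hR, PySem.List.getElem?_pyRange_one]
  have hmem : (((j : Int) + 1) ∈ PySem.List.pyRange 4 (n + 1) 4) ↔
      4 ≤ (j : Int) + 1 ∧ (j : Int) + 1 < n + 1 ∧ (4 : Int) ∣ (j : Int) + 1 - 4 :=
    PySem.List.mem_pyRange_iff_of_pos (by norm_num) _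
  by_cases hj : j < (n + 1 - 1).toNat
  · have hjn : (j : Int) + 1 < n + 1 := by omega
    rw [if_pos hj]
    by_cases hdvd : (4 : Int) ∣ (1 + (j : Int))
    · have h4 : 4 ≤ (j : Int) + 1 := by
        obtain ⟨c, hc⟩ := hdvd; omega
      have : ((j : Int) + 1) ∈ PySem.List.pyRange 4 (n + 1) 4 := by
        rw [hmem]
        exact ⟨h4, hjn, by omega⟩
      rw [if_pos this]
      simp only [Option.map_some]
      rw [if_pos ((PySem.Int.mod_eq_zero_iff_dvd _ _).mpr hdvd)]
    · have hmod : ¬ PySem.Int.mod (1 + (j : Int)) 4 = 0 := by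
        rw [PySem.Int.mod_eq_zero_iff_dvd]; exact hdvd
      have : ¬ ((j : Int) + 1) ∈ PySem.List.pyRange 4 (n + 1) 4 := by
        rw [hmem]; rintro ⟨_, _, c, hc⟩; exact hdvd ⟨c + 1, by omega⟩
      rw [if_neg this]
      simp only [Option.map_some]
      rw [if_neg hmod]
  · rw [if_neg hj]
    have : ¬ ((j : Int) + 1) ∈ PySem.List.pyRange 4 (n + 1) 4 := by
      rw [hmem]; rintro ⟨_, h2, _⟩; omega
    rw [if_neg this]
    simp
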